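-- pv_equiv track=rewrite | github.com/danzhewuju/Spindle | string_distant.py | new_str_compression
-- ===== SOURCE A (Python) =====
-- def new_str_compression(data, k=5):
--     result = ""
--     count = 0
--     for d in data:
--         if d == "0":
--             count += 1
--         else:
--             if count >= k:
--                 result += "0" * (k - 1) + d
--             else:
--                 result += "0" * count + d
--             count = 0
--     if count >= k:
--         result += "0"*(k-1)
--     else:
--         result += "0"*count
--     return result
-- ===== SOURCE B (Python) =====
-- def new_str_compression(data, k=5):
--     parts = []
--     i = 0
--     n = len(data)
--     while i < n:
--         j = i
--         while j < n and data[j] == data[i]: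
--             j += 1
--         if data[i] == "0":
--             parts.append("0" * min(j - i, k - 1))
--         else:
--             parts.append(data[i:j])
--         i = j
--     return "".join(parts)
-- ===== Notes on version B (the rewrite author's own statement) =====
-- stated objective: idiomatic
-- what changed: B segments the string into maximal runs with a two-pointer scan and emits each run at once (capping zero runs via min(len, k-1)), instead of A's per-character counter with quadratic string concatenation.
import Mathlib
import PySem

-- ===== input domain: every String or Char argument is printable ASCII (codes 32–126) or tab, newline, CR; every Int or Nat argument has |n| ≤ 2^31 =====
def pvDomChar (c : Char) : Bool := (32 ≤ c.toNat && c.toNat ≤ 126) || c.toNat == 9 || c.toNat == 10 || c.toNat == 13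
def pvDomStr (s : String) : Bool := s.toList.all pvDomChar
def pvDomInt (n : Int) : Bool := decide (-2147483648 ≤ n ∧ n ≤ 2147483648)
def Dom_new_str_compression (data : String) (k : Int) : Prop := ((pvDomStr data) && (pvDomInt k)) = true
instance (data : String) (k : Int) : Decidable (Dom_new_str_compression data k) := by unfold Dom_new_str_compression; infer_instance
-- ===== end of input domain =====

-- B caps each maximal zero run via a run-segmentation pass (idiomatic grouping) instead of
-- A's per-character counter with repeated string concatenation.

-- ===== PORT A =====
-- Python "0" * m (empty for m ≤ 0); exact on all Int m
def pyZeros (m : Int) : List Char := List.replicate m.toNat '0'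

-- loop body of A: state = (result, count)
def aStep (k : Int) (st : List Char × Int) (d : Char) : List Char × Int :=
  if d = '0' then (st.1, st.2 + 1)
  else if st.2 ≥ k then (st.1 ++ pyZeros (k - 1) ++ [d], 0)
  else (st.1 ++ pyZeros st.2 ++ [d], 0)

def new_str_compression (data : String) (k : Int) : String :=
  let st := data.toList.foldl (aStep k) ([], 0)
  if st.2 ≥ k then String.ofList (st.1 ++ pyZeros (k - 1))
  else String.ofList (st.1 ++ pyZeros st.2)

-- ===== PORT B =====
-- inner while loop of B: length of the maximal run of c at the front, and the rest
def takeRun (c : Char) : List Char → Nat × List Char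
  | [] => (0, [])
  | d :: ds => if d = c then let p := takeRun c ds; (p.1 + 1, p.2) else (0, d :: ds)

theorem takeRun_len (c : Char) : ∀ (cs : List Char), (takeRun c cs).2.length ≤ cs.length := by
  intro cs
  induction cs with
  | nil => simp [takeRun]
  | cons d ds ih =>
    simp only [takeRun]
    split
    · exact Nat.le_succ_of_le ih
    · simp

-- outer while loop of B: maximal runs, left to right
def runs : List Char → List (Char × Nat)
  | [] => []
  | c :: cs => (c, (takeRun c cs).1 + 1) :: runs (takeRun c cs).2
termination_by cs => cs.length
decreasing_by simpa using Nat.lt_succ_of_le (takeRun_len c cs)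

-- one appended part of B: capped zeros, or the run itself
def emitRun (k : Int) (r : Char × Nat) : List Char :=
  if r.1 = '0' then List.replicate (min (r.2 : Int) (k - 1)).toNat '0'
  else List.replicate r.2 r.1

def new_str_compression_alt (data : String) (k : Int) : String :=
  String.ofList ((runs data.toList).flatMap (emitRun k))

-- ===== PRECONDITION & SPEC =====
def Spec_new_str_compression (data : String) (k : Int) (out : String) : Prop := out = new_str_compression_alt data k
instance (data : String) (k : Int) (out : String) : Decidable (Spec_new_str_compression data k out) := by unfold Spec_new_str_compression; infer_instance

-- ===== CLAIM (what is proved, stated in full; the proofs are below) =====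
def Claim_equal_new_str_compression : Prop := ∀ (data : String) (k : Int), Dom_new_str_compression data k → Spec_new_str_compression data k (new_str_compression data k)

-- ===== LEMMAS AND PROOFS =====

theorem takeRun_repl (c : Char) : ∀ (m : Nat) (rest : List Char),
    (rest.head? = some c → False) → takeRun c (List.replicate m c ++ rest) = (m, rest) := by
  intro m
  induction m with
  | zero =>
    intro rest h
    cases rest with
    | nil => simp [takeRun]
    | cons d ds =>
      simp only [List.replicate, List.nil_append, takeRun]
      rw [if_neg]
      intro hd; exact h (by simp [hd])
  | succ n ih =>
    intro rest h
    simp [List.replicate_succ, takeRun, ih rest h]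

theorem head?_ne (d : Char) (ds : List Char) (hd : d ≠ '0') :
    (d :: ds).head? = some '0' → False := by
  simp [hd]

theorem emit_zero_run (k : Int) (m : Nat) :
    emitRun k ('0', m) = List.replicate (min (m : Int) (k - 1)).toNat '0' := by
  simp [emitRun]

theorem flat_cons (k : Int) (d : Char) (cs : List Char) (hd : d ≠ '0') :
    (runs (d :: cs)).flatMap (emitRun k) = d :: (runs cs).flatMap (emitRun k) := by
  cases cs with
  | nil => simp [runs, takeRun, emitRun, hd]
  | cons e es =>
    by_cases he : e = d
    · subst he
      rw [runs, runs]
      simp only [takeRun]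
      simp [emitRun, hd, List.replicate_succ]
    · have ht : takeRun d (e :: es) = (0, e :: es) := by
        simp [takeRun, fun h => he h]
      rw [runs, ht]
      simp [emitRun, hd]

theorem flat_zeros (k : Int) (m : Nat) (d : Char) (cs : List Char) (hd : d ≠ '0') :
    (runs (List.replicate m '0' ++ d :: cs)).flatMap (emitRun k)
      = List.replicate (min (m : Int) (k - 1)).toNat '0' ++ d :: (runs cs).flatMap (emitRun k) := by
  cases m with
  | zero =>
    have h0 : (min ((0 : Nat) : Int) (k - 1)).toNat = 0 := by omega
    simp only [List.replicate, List.nil_append, h0, flat_cons k d cs hd]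
  | succ n =>
    rw [List.replicate_succ, List.cons_append, runs,
      takeRun_repl '0' n (d :: cs) (head?_ne d cs hd)]
    simp only [List.flatMap_cons, emit_zero_run, flat_cons k d cs hd]

theorem runs_repl (m : Nat) :
    runs (List.replicate m '0') = if m = 0 then [] else [('0', m)] := by
  cases m with
  | zero => simp [runs]
  | succ n =>
    have ht : takeRun '0' (List.replicate n '0') = (n, []) := by
      simpa using takeRun_repl '0' n [] (by simp)
    rw [List.replicate_succ, runs, ht]
    simp [runs]

theorem loop_eq (k : Int) : ∀ (cs res : List Char) (m : Nat),
    (let st := cs.foldl (aStep k) (res, (m : Int));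
      if st.2 ≥ k then st.1 ++ pyZeros (k - 1) else st.1 ++ pyZeros st.2)
    = res ++ (runs (List.replicate m '0' ++ cs)).flatMap (emitRun k) := by
  intro cs
  induction cs with
  | nil =>
    intro res m
    simp only [List.foldl_nil, List.append_nil, runs_repl]
    cases m with
    | zero =>
      simp only [pyZeros]
      split
      · have h0 : (k - 1).toNat = 0 := by omega
        simp [h0]
      · simp
    | succ n =>
      rw [if_neg (Nat.succ_ne_zero n)]
      simp only [List.flatMap_cons, List.flatMap_nil, List.append_nil, emit_zero_run, pyZeros]
      split <;> rename_i h
      · congr 1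
        congr 1
        omega
      · congr 1
        congr 1
        omega
  | cons d ds ih =>
    intro res m
    by_cases hd : d = '0'
    · subst hd
      simp only [List.foldl_cons, aStep]
      have h1 : ((m : Int) + 1) = ((m + 1 : Nat) : Int) := by push_cast; ring
      have h2 : List.replicate m '0' ++ '0' :: ds = List.replicate (m + 1) '0' ++ ds := by
        rw [List.replicate_succ' (n := m)]
        simp
      rw [h1, h2]
      exact ih res (m + 1)
    · simp only [List.foldl_cons, aStep, if_neg hd]
      rw [flat_zeros k m d ds hd]
      split <;> rename_i h
      · have e := ih (res ++ pyZeros (k - 1) ++ [d]) 0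
        simp only [List.replicate, List.nil_append, Nat.cast_zero] at e
        rw [e]
        simp only [pyZeros, List.append_assoc, List.singleton_append]
        congr 2
        congr 1
        omega
      · have e := ih (res ++ pyZeros (m : Int) ++ [d]) 0
        simp only [List.replicate, List.nil_append, Nat.cast_zero] at e
        rw [e]
        simp only [pyZeros, List.append_assoc, List.singleton_append]
        congr 2
        congr 1
        omega

-- ===== VERDICT (by name: the statement is the Claim_ definition above) =====
theorem new_str_compression_spec : Claim_equal_new_str_compression := by
  intro data k _
  unfold Spec_new_str_compression new_str_compression new_str_compression_alt
  have h := loop_eq k data.toList [] 0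
  simp only [Nat.cast_zero, List.replicate, List.nil_append] at h
  show (if (data.toList.foldl (aStep k) ([], 0)).2 ≥ k
        then String.ofList ((data.toList.foldl (aStep k) ([], 0)).1 ++ pyZeros (k - 1))
        else String.ofList ((data.toList.foldl (aStep k) ([], 0)).1 ++
          pyZeros (data.toList.foldl (aStep k) ([], 0)).2))
      = String.ofList ((runs data.toList).flatMap (emitRun k))
  split <;> rename_i hc
  · rw [if_pos hc] at h
    exact congrArg String.ofList h
  · rw [if_neg hc] at h
    exact congrArg String.ofList h
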